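-- pv_equiv track=rewrite | github.com/bssrdf/pyleet | NumberofBeautifulPartitions.py | beautifulPartitions6
-- ===== SOURCE A (Python) =====
-- def beautifulPartitions6(s: str, k: int, minLength: int) -> int:
--     MOD = 10**9 + 7
--     n = len(s)
--     primes = {'2', '3', '5', '7'}
--     if s[0] not in primes or s[-1] in primes: return 0
--     dp = [[0]*(k+1) for _ in range(n+1)]
--     preSum = [[0]*(k+1) for _ in range(n+1)]
--     dp[0][0] = 1
--     preSum[0][0] = 1
--     for i in range(1, n+1):
--         if i >= minLength and s[i-1] not in primes and (i == n or s[i] in primes):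
--             for l in range(1, k+1):
--                 dp[i][l] = preSum[i-minLength][l-1]
--         for l in range(k+1):
--             preSum[i][l] = (preSum[i-1][l] + dp[i][l]) % MOD
--     return dp[n][k]
-- ===== SOURCE B (Python) =====
-- def beautifulPartitions6(s: str, k: int, minLength: int) -> int:
--     MOD = 10**9 + 7
--     n = len(s)
--     primes = {'2', '3', '5', '7'}
--     if s[0] not in primes or s[-1] in primes:
--         return 0
--     # good[i]: a partition boundary may sit right after position i (1-based cut index)
--     good = [False] + [i >= minLength and s[i - 1] not in primes
--                       and (i == n or s[i] in primes) for i in range(1, n + 1)]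
--     # col[j] = number of ways to cut the prefix of length j into the current number of parts
--     col = [1] + [0] * n
--     for _ in range(k):
--         col = [sum(col[:i - minLength + 1]) % MOD if good[i] else 0
--                for i in range(n + 1)]
--     return col[n]
-- ===== Notes on version B (the rewrite author's own statement) =====
-- stated objective: simpler
-- what changed: Replaces A's two (n+1)x(k+1) tables and incrementally maintained prefix-sum rows by a single 1-D column of boundary counts that is recomputed k times, summing a list slice directly for each boundary position.
-- outside the precondition, e.g. on beautifulPartitions6('21', 1, 0): A returns 0, B returns 1; on beautifulPartitions6('21', 0, -2): A returns 0, B returns 0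
import Mathlib
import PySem

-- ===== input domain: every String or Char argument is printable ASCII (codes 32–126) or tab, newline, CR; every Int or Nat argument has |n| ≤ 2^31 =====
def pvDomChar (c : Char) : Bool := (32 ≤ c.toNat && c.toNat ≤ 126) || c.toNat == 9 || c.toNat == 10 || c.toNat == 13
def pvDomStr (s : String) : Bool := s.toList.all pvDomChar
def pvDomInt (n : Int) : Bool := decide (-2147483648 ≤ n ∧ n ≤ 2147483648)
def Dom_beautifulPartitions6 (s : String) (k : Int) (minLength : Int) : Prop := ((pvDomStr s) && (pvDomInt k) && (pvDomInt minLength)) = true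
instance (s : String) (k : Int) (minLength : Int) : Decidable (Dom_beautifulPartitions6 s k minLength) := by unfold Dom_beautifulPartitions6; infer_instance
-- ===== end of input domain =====

-- B replaces A's two (n+1)×(k+1) tables and running prefix-sum rows by a single 1-D column
-- recomputed k times (objective: simpler, not faster; proved equal on Pre_).

-- ===== PORT A =====
-- total 2-D read/write helpers for Python's t[i][l] and t[i][l] = v;
-- exact here: under Pre_ every index the programs evaluate is nonnegative and in range.
def pvGet2 (t : Array (Array Int)) (i l : Int) : Int :=
  (t.getD i.toNat #[]).getD l.toNat 0

def pvSet2 (t : Array (Array Int)) (i l : Int) (v : Int) : Array (Array Int) :=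
  t.modify i.toNat (fun r => r.setIfInBounds l.toNat v)

def beautifulPartitions6 (s : String) (k : Int) (minLength : Int) : Int :=
  let MOD : Int := 10 ^ 9 + 7
  let cs : List Char := s.toList
  let n : Int := PySem.List.len cs
  let primes : PySem.Set Char := PySem.Set.ofList ['2', '3', '5', '7']
  -- s[0] / s[-1]: pyGetD is exact here, Pre_ gives s ≠ ""
  if ¬ PySem.List.pyGetD cs 0 ' ' ∈ primes ∨ PySem.List.pyGetD cs (-1) ' ' ∈ primes then 0
  else
    let dp : Array (Array Int) :=
      ((PySem.List.pyRange 0 (n + 1) 1).map (fun _ => Array.replicate (k + 1).toNat 0)).toArray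
    let preSum : Array (Array Int) :=
      ((PySem.List.pyRange 0 (n + 1) 1).map (fun _ => Array.replicate (k + 1).toNat 0)).toArray
    let dp := pvSet2 dp 0 0 1
    let preSum := pvSet2 preSum 0 0 1
    let st :=
      (PySem.List.pyRange 1 (n + 1) 1).foldl (fun st i =>
        let dp :=
          if minLength ≤ i ∧ ¬ PySem.List.pyGetD cs (i - 1) ' ' ∈ primes ∧ (i = n ∨ PySem.List.pyGetD cs i ' ' ∈ primes) then
            (PySem.List.pyRange 1 (k + 1) 1).foldl
              (fun dp l => pvSet2 dp i l (pvGet2 st.2 (i - minLength) (l - 1))) st.1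
          else st.1
        let preSum :=
          (PySem.List.pyRange 0 (k + 1) 1).foldl
            (fun preSum l =>
              pvSet2 preSum i l (PySem.Int.mod (pvGet2 preSum (i - 1) l + pvGet2 dp i l) MOD)) st.2
        (dp, preSum)) (dp, preSum)
    pvGet2 st.1 n k

-- ===== PORT B =====
def beautifulPartitions6_alt (s : String) (k : Int) (minLength : Int) : Int :=
  let MOD : Int := 10 ^ 9 + 7
  let cs : List Char := s.toList
  let n : Int := PySem.List.len cs
  let primes : PySem.Set Char := PySem.Set.ofList ['2', '3', '5', '7']
  if ¬ PySem.List.pyGetD cs 0 ' ' ∈ primes ∨ PySem.List.pyGetD cs (-1) ' ' ∈ primes then 0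
  else
    let good : List Bool :=
      [false] ++ (PySem.List.pyRange 1 (n + 1) 1).map (fun i =>
        decide (minLength ≤ i ∧ ¬ PySem.List.pyGetD cs (i - 1) ' ' ∈ primes ∧ (i = n ∨ PySem.List.pyGetD cs i ' ' ∈ primes)))
    let col : List Int := [1] ++ List.replicate n.toNat 0
    let col :=
      (PySem.List.pyRange 0 k 1).foldl (fun col _ =>
        (PySem.List.pyRange 0 (n + 1) 1).map (fun i =>
          if PySem.List.pyGetD good i false then
            PySem.Int.mod (PySem.List.slice col none (some (i - minLength + 1))).sum MOD
          else 0)) col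
    PySem.List.pyGetD col n 0

-- ===== PRECONDITION & SPEC =====
-- Pre_ keeps the task's natural domain: nonempty s and — only when the first/last-digit
-- check passes, since otherwise both programs return 0 immediately for any k/minLength —
-- k ≥ 0 and minLength ≥ 1; beyond it A raises IndexError (negative k, or negative
-- minLength with k ≥ 1), returns 0 without running the DP (negative minLength with
-- k = 0), or, at minLength = 0 (an unspecified corner), both programs' values are
-- accidental: A reads its prefix-sum row before filling it and returns 0, B counts
-- partitions into parts of length ≥ 0.
def Pre_beautifulPartitions6 (s : String) (k : Int) (minLength : Int) : Prop :=
  s ≠ "" ∧ (0 ≤ k ∧ 1 ≤ minLength ∨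
    s.toList.getD 0 ' ' ∉ (['2', '3', '5', '7'] : List Char) ∨
    s.toList.getD (s.toList.length - 1) ' ' ∈ (['2', '3', '5', '7'] : List Char))
instance (s : String) (k : Int) (minLength : Int) : Decidable (Pre_beautifulPartitions6 s k minLength) := by
  unfold Pre_beautifulPartitions6; infer_instance

def pvWitness_beautifulPartitions6 : String × Int × Int := ("21", 1, 1)

def Spec_beautifulPartitions6 (s : String) (k : Int) (minLength : Int) (out : Int) : Prop :=
  out = beautifulPartitions6_alt s k minLength
instance (s : String) (k : Int) (minLength : Int) (out : Int) : Decidable (Spec_beautifulPartitions6 s k minLength out) := by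
  unfold Spec_beautifulPartitions6; infer_instance

-- ===== CLAIM (what is proved, stated in full; the proofs are below) =====
def Claim_equal_beautifulPartitions6 : Prop := ∀ (s : String) (k : Int) (minLength : Int), Dom_beautifulPartitions6 s k minLength → Pre_beautifulPartitions6 s k minLength → Spec_beautifulPartitions6 s k minLength (beautifulPartitions6 s k minLength)

-- ===== LEMMAS AND PROOFS =====

def pvShape (t : Array (Array Int)) (N K : Nat) : Prop :=
  t.size = N + 1 ∧ ∀ (i : Nat) (h : i < t.size), t[i].size = K + 1

lemma pv_mod_add_mod (x y : Int) :
    PySem.Int.mod (PySem.Int.mod x 1000000007 + y) 1000000007 = PySem.Int.mod (x + y) 1000000007 := by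
  rw [PySem.Int.mod_eq_emod_of_pos (by norm_num : (0:Int) < 1000000007),
      PySem.Int.mod_eq_emod_of_pos (by norm_num : (0:Int) < 1000000007),
      PySem.Int.mod_eq_emod_of_pos (by norm_num : (0:Int) < 1000000007)]
  omega

lemma pv_arr_getD_lt {α : Type} (a : Array α) (i : Nat) (d : α) (h : i < a.size) :
    a.getD i d = a[i] := by
  simp [Array.getD, h]

lemma pv_arr_getD_ge {α : Type} (a : Array α) (i : Nat) (d : α) (h : a.size ≤ i) :
    a.getD i d = d := by
  simp [Array.getD]
  omega

lemma pvGet2_natCast (t : Array (Array Int)) (j l : Nat) :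
    pvGet2 t (j : Int) (l : Int) = (t.getD j #[]).getD l 0 := by
  simp [pvGet2]

lemma pvSet2_natCast (t : Array (Array Int)) (i l : Nat) (v : Int) :
    pvSet2 t (i : Int) (l : Int) v = t.modify i (fun r => r.setIfInBounds l v) := by
  simp [pvSet2]

lemma pvGet2_set2 (t : Array (Array Int)) (i l j l' : Nat) (v : Int)
    (hi : i < t.size) (hl : l < (t.getD i #[]).size) :
    pvGet2 (pvSet2 t (i : Int) (l : Int) v) (j : Int) (l' : Int) =
      if j = i ∧ l' = l then v else pvGet2 t (j : Int) (l' : Int) := by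
  rw [pvSet2_natCast, pvGet2_natCast, pvGet2_natCast]
  rw [pv_arr_getD_lt t i #[] hi] at hl
  rcases Nat.lt_or_ge j t.size with hj | hj
  · have hj2 : j < (t.modify i (fun r => r.setIfInBounds l v)).size := by
      rw [Array.size_modify]; exact hj
    rw [pv_arr_getD_lt _ j _ hj2, pv_arr_getD_lt t j _ hj, Array.getElem_modify hj2]
    rcases eq_or_ne i j with rfl | hne
    · rw [if_pos rfl]
      rcases Nat.lt_or_ge l' t[i].size with hl' | hl'
      · have hl'2 : l' < (t[i].setIfInBounds l v).size := by
          rw [Array.size_setIfInBounds]; exact hl'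
      
        rw [pv_arr_getD_lt _ l' _ hl'2, pv_arr_getD_lt _ l' _ hl', Array.getElem_setIfInBounds hl']
        rcases eq_or_ne l l' with rfl | hll
        · rw [if_pos rfl, if_pos ⟨rfl, rfl⟩]
        · rw [if_neg hll, if_neg (by tauto)]
      · have hge : (t[i].setIfInBounds l v).size ≤ l' := by
          rw [Array.size_setIfInBounds]; exact hl'
        rw [pv_arr_getD_ge _ l' _ hge, pv_arr_getD_ge _ l' _ hl', if_neg (by omega)]
    · rw [if_neg hne, if_neg (by tauto)]
  · have hj2 : (t.modify i (fun r => r.setIfInBounds l v)).size ≤ j := by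
      rw [Array.size_modify]; exact hj
    rw [pv_arr_getD_ge _ j _ hj2, pv_arr_getD_ge t j _ hj, if_neg (by omega)]

lemma pvShape_set2 (t : Array (Array Int)) (N K i l : Nat) (v : Int) (ht : pvShape t N K)
    (hi : i ≤ N) : pvShape (pvSet2 t (i : Int) (l : Int) v) N K := by
  obtain ⟨h1, h2⟩ := ht
  rw [pvSet2_natCast]
  refine ⟨by rw [Array.size_modify, h1], ?_⟩
  intro a ha
  rw [Array.size_modify] at ha
  rw [Array.getElem_modify (by rw [Array.size_modify]; exact ha)]
  by_cases h : i = a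
  · rw [if_pos h, Array.size_setIfInBounds]; exact h2 a ha
  · rw [if_neg h]; exact h2 a ha

lemma pvShape_row (t : Array (Array Int)) (N K i : Nat) (ht : pvShape t N K) (hi : i ≤ N) :
    (t.getD i #[]).size = K + 1 := by
  obtain ⟨h1, h2⟩ := ht
  have hi' : i < t.size := by omega
  rw [pv_arr_getD_lt t i #[] hi']
  exact h2 i hi'

lemma pv_writeRow (N K i : Nat) (f : Int → Int) :
    ∀ (c a : Nat) (t : Array (Array Int)), pvShape t N K → i ≤ N → a + c ≤ K + 1 →
    pvShape ((PySem.List.pyRange (a : Int) ((a : Int) + (c : Int)) 1).foldl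
        (fun t l => pvSet2 t (i : Int) l (f l)) t) N K ∧
    ∀ (j l' : Nat), pvGet2 ((PySem.List.pyRange (a : Int) ((a : Int) + (c : Int)) 1).foldl
        (fun t l => pvSet2 t (i : Int) l (f l)) t) (j : Int) (l' : Int) =
      if j = i ∧ a ≤ l' ∧ l' < a + c then f (l' : Int) else pvGet2 t (j : Int) (l' : Int) := by
  intro c
  induction c with
  | zero =>
    intro a t ht hi hc
    rw [show ((a : Int) + (0 : Nat) = (a : Int)) by push_cast; ring,
        PySem.List.pyRange_one_eq_nil (le_refl _)]
    simp only [List.foldl_nil]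
    refine ⟨ht, fun j l' => ?_⟩
    rw [if_neg (by omega)]
  | succ c ih =>
    intro a t ht hi hc
    have hrow : (t.getD i #[]).size = K + 1 := pvShape_row t N K i ht hi
    have hlen : i < t.size := by obtain ⟨h1, _⟩ := ht; omega
    rw [PySem.List.pyRange_one_cons (by push_cast; omega)]
    simp only [List.foldl_cons]
    have hcast : ((a : Int) + 1) = ((a + 1 : Nat) : Int) := by push_cast; ring
    have hcast2 : ((a : Int) + ((c + 1 : Nat) : Int)) = ((a + 1 : Nat) : Int) + (c : Nat) := by
      push_cast; ring
    rw [hcast2, hcast]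
    obtain ⟨hsh, hget⟩ := ih (a + 1) (pvSet2 t (i : Int) (a : Int) (f (a : Int)))
      (pvShape_set2 t N K i a _ ht hi) hi (by omega)
    refine ⟨hsh, fun j l' => ?_⟩
    rw [hget j l', pvGet2_set2 t i a j l' _ hlen (by omega)]
    by_cases hji : j = i
    · subst hji
      by_cases hla : l' = a
      · subst hla; rw [if_neg (by omega), if_pos ⟨rfl, rfl⟩, if_pos (by omega)]
      · by_cases hin : a + 1 ≤ l' ∧ l' < a + 1 + c
        · rw [if_pos ⟨rfl, hin⟩, if_pos (by omega)]
        · rw [if_neg (by omega), if_neg (by tauto), if_neg (by omega)]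
    · rw [if_neg (by tauto), if_neg (by tauto), if_neg (by tauto)]

lemma pv_writePsRow (N K i : Nat) (hi1 : 1 ≤ i) (w : Int → Int) :
    ∀ (c a : Nat) (t : Array (Array Int)), pvShape t N K → i ≤ N → a + c ≤ K + 1 →
    pvShape ((PySem.List.pyRange (a : Int) ((a : Int) + (c : Int)) 1).foldl
        (fun t l => pvSet2 t (i : Int) l (PySem.Int.mod (pvGet2 t ((i : Int) - 1) l + w l) 1000000007)) t) N K ∧
    ∀ (j l' : Nat), pvGet2 ((PySem.List.pyRange (a : Int) ((a : Int) + (c : Int)) 1).foldl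
        (fun t l => pvSet2 t (i : Int) l (PySem.Int.mod (pvGet2 t ((i : Int) - 1) l + w l) 1000000007)) t) (j : Int) (l' : Int) =
      if j = i ∧ a ≤ l' ∧ l' < a + c then
        PySem.Int.mod (pvGet2 t ((i : Int) - 1) (l' : Int) + w (l' : Int)) 1000000007
      else pvGet2 t (j : Int) (l' : Int) := by
  intro c
  induction c with
  | zero =>
    intro a t ht hi hc
    rw [show ((a : Int) + (0 : Nat) = (a : Int)) by push_cast; ring,
        PySem.List.pyRange_one_eq_nil (le_refl _)]
    simp only [List.foldl_nil]
    exact ⟨ht, fun j l' => by rw [if_neg (by omega)]⟩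
  | succ c ih =>
    intro a t ht hi hc
    have hrow : (t.getD i #[]).size = K + 1 := pvShape_row t N K i ht hi
    have hlen : i < t.size := by obtain ⟨h1, _⟩ := ht; omega
    have hm1 : ((i : Int) - 1) = ((i - 1 : Nat) : Int) := by omega
    rw [PySem.List.pyRange_one_cons (by push_cast; omega)]
    simp only [List.foldl_cons]
    have hcast : ((a : Int) + 1) = ((a + 1 : Nat) : Int) := by push_cast; ring
    have hcast2 : ((a : Int) + ((c + 1 : Nat) : Int)) = ((a + 1 : Nat) : Int) + (c : Nat) := by
      push_cast; ring
    rw [hcast2, hcast]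
    set t1 := pvSet2 t (i : Int) (a : Int) (PySem.Int.mod (pvGet2 t ((i : Int) - 1) (a : Int) + w (a : Int)) 1000000007) with ht1
    obtain ⟨hsh, hget⟩ := ih (a + 1) t1 (pvShape_set2 t N K i a _ ht hi) hi (by omega)
    have hrowpres : ∀ l' : Nat, pvGet2 t1 ((i : Int) - 1) (l' : Int) = pvGet2 t ((i : Int) - 1) (l' : Int) := by
      intro l'
      rw [hm1, ht1, pvGet2_set2 t i a _ l' _ hlen (by omega), if_neg (by omega)]
    refine ⟨hsh, fun j l' => ?_⟩
    rw [hget j l', hrowpres l',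
        ht1, pvGet2_set2 t i a j l' _ hlen (by omega)]
    by_cases hji : j = i
    · subst hji
      by_cases hla : l' = a
      · subst hla; rw [if_neg (by omega), if_pos ⟨rfl, rfl⟩, if_pos (by omega)]
      · by_cases hin : a + 1 ≤ l' ∧ l' < a + 1 + c
        · rw [if_pos ⟨rfl, hin⟩, if_pos (by omega)]
        · rw [if_neg (by omega), if_neg (by tauto), if_neg (by omega)]
    · rw [if_neg (by tauto), if_neg (by tauto), if_neg (by tauto)]

def pvPrimes : List Char := ['2', '3', '5', '7']

abbrev pvGoodP (cs : List Char) (m : Int) (j : Nat) : Prop :=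
  1 ≤ j ∧ m ≤ (j : Int) ∧ cs.getD (j - 1) ' ' ∉ pvPrimes ∧ (j = cs.length ∨ cs.getD j ' ' ∈ pvPrimes)

def pvSumTo (f : Nat → Int) (c : Nat) : Int := ((List.range c).map f).sum

def pvCol (cs : List Char) (m : Int) : Nat → Nat → Int
  | 0, j => if j = 0 then 1 else 0
  | l + 1, j =>
      if pvGoodP cs m j then PySem.Int.mod (pvSumTo (pvCol cs m l) (j + 1 - m.toNat)) 1000000007
      else 0

def pvPre (cs : List Char) (m : Int) (l j : Nat) : Int :=
  PySem.Int.mod (pvSumTo (pvCol cs m l) (j + 1)) 1000000007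

lemma pvSumTo_succ (f : Nat → Int) (c : Nat) : pvSumTo f (c + 1) = pvSumTo f c + f c := by
  simp [pvSumTo, List.range_succ]

lemma pvCol_at_zero (cs : List Char) (m : Int) (l : Nat) :
    pvCol cs m l 0 = if l = 0 then 1 else 0 := by
  cases l with
  | zero => rfl
  | succ l => rw [pvCol, if_neg (by unfold pvGoodP; omega)]; simp

lemma pvPre_at_zero (cs : List Char) (m : Int) (l : Nat) :
    pvPre cs m l 0 = if l = 0 then 1 else 0 := by
  unfold pvPre
  rw [show (0 + 1 = 1) from rfl, pvSumTo_succ]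
  rw [pvCol_at_zero]
  unfold pvSumTo
  by_cases h : l = 0 <;> simp [h]

lemma pv_guard_iff (cs : List Char) (m : Int) (j : Nat) (hj : 1 ≤ j) :
    (m ≤ (j : Int) ∧ ¬ PySem.List.pyGetD cs ((j : Int) - 1) ' ' ∈ PySem.Set.ofList ['2', '3', '5', '7'] ∧
      ((j : Int) = (cs.length : Int) ∨ PySem.List.pyGetD cs (j : Int) ' ' ∈ PySem.Set.ofList ['2', '3', '5', '7'])) ↔
    pvGoodP cs m j := by
  unfold pvGoodP pvPrimes
  have h1 : ((j : Int) - 1) = ((j - 1 : Nat) : Int) := by omega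
  rw [h1]
  simp only [PySem.List.pyGetD_natCast, PySem.Set.mem_ofList, Nat.cast_inj]
  constructor
  · rintro ⟨a, b, c⟩; exact ⟨hj, a, b, c⟩
  · rintro ⟨_, a, b, c⟩; exact ⟨a, b, c⟩


def pvInit (cs : List Char) (K : Nat) : Array (Array Int) :=
  pvSet2 (((PySem.List.pyRange 0 ((cs.length : Int) + 1) 1).map
    (fun _ => Array.replicate (((K : Int)) + 1).toNat 0)).toArray) 0 0 1

lemma pv_base (cs : List Char) (K : Nat) :
    pvShape (pvInit cs K) cs.length K ∧
    ∀ j l' : Nat, pvGet2 (pvInit cs K) (j : Int) (l' : Int) =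
      if j = 0 ∧ l' = 0 then 1 else 0 := by
  unfold pvInit
  set N := cs.length
  have hK : (((K : Int)) + 1).toNat = K + 1 := by omega
  set T0 : Array (Array Int) := ((PySem.List.pyRange 0 ((N : Int) + 1) 1).map
      (fun _ => Array.replicate (((K : Int)) + 1).toNat 0)).toArray with hT0
  have hlen : T0.size = N + 1 := by
    rw [hT0, List.size_toArray, List.length_map, PySem.List.length_pyRange_one]; omega
  have hrowi : ∀ (i : Nat) (h : i < T0.size), T0[i] = Array.replicate (K + 1) 0 := by
    intro i h
    have h' : i < ((PySem.List.pyRange 0 ((N : Int) + 1) 1).map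
        (fun _ => Array.replicate (((K : Int)) + 1).toNat 0)).length := by
      rw [List.length_map, PySem.List.length_pyRange_one]
      omega
    simp only [hT0, List.getElem_toArray, List.getElem_map, hK]
  have hsh : pvShape T0 N K := by
    refine ⟨hlen, fun i h => ?_⟩
    rw [hrowi i h, Array.size_replicate]
  have hget0 : ∀ j l' : Nat, pvGet2 T0 (j : Int) (l' : Int) = 0 := by
    intro j l'
    rw [pvGet2_natCast]
    rcases Nat.lt_or_ge j T0.size with hj | hj
    · rw [pv_arr_getD_lt T0 j #[] hj, hrowi j hj]
      rcases Nat.lt_or_ge l' (Array.replicate (K + 1) (0 : Int)).size with hl | hl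
      · rw [pv_arr_getD_lt _ l' _ hl, Array.getElem_replicate]
      · rw [pv_arr_getD_ge _ l' _ hl]
    · rw [pv_arr_getD_ge T0 j #[] hj, pv_arr_getD_ge _ l' _ (by simp)]
  have hr0 : (T0.getD 0 #[]).size = K + 1 := pvShape_row T0 N K 0 hsh (by omega)
  constructor
  · exact pvShape_set2 T0 N K 0 0 1 hsh (by omega)
  · intro j l'
    have h00 := pvGet2_set2 T0 0 0 j l' 1 (by omega) (by omega)
    rw [show ((0:Nat):Int) = 0 by rfl] at h00
    rw [h00, hget0]

abbrev pvGuard (cs : List Char) (m : Int) (i : Int) : Prop :=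
  m ≤ i ∧ ¬ PySem.List.pyGetD cs (i - 1) ' ' ∈ PySem.Set.ofList ['2', '3', '5', '7'] ∧
    (i = (cs.length : Int) ∨ PySem.List.pyGetD cs i ' ' ∈ PySem.Set.ofList ['2', '3', '5', '7'])

def pvStepA (cs : List Char) (m kI : Int) :
    Array (Array Int) × Array (Array Int) → Int → Array (Array Int) × Array (Array Int) :=
  fun st i =>
    let dp :=
      if pvGuard cs m i then
        (PySem.List.pyRange 1 (kI + 1) 1).foldl
          (fun dp l => pvSet2 dp i l (pvGet2 st.2 (i - m) (l - 1))) st.1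
      else st.1
    let preSum :=
      (PySem.List.pyRange 0 (kI + 1) 1).foldl
        (fun preSum l =>
          pvSet2 preSum i l (PySem.Int.mod (pvGet2 preSum (i - 1) l + pvGet2 dp i l) 1000000007)) st.2
    (dp, preSum)

lemma pvStepA_fst (cs : List Char) (m kI : Int) (st : Array (Array Int) × Array (Array Int)) (i : Int) :
    (pvStepA cs m kI st i).1 =
      if pvGuard cs m i then
        (PySem.List.pyRange 1 (kI + 1) 1).foldl
          (fun dp l => pvSet2 dp i l (pvGet2 st.2 (i - m) (l - 1))) st.1
      else st.1 := rfl

lemma pvStepA_snd (cs : List Char) (m kI : Int) (st : Array (Array Int) × Array (Array Int)) (i : Int) :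
    (pvStepA cs m kI st i).2 =
      (PySem.List.pyRange 0 (kI + 1) 1).foldl
        (fun preSum l =>
          pvSet2 preSum i l (PySem.Int.mod (pvGet2 preSum (i - 1) l + pvGet2 (pvStepA cs m kI st i).1 i l) 1000000007)) st.2 := rfl

lemma pvCol_zero' (cs : List Char) (m : Int) (j : Nat) : pvCol cs m 0 j = if j = 0 then 1 else 0 := rfl

lemma pvCol_succ (cs : List Char) (m : Int) (l j : Nat) :
    pvCol cs m (l + 1) j =
      if pvGoodP cs m j then PySem.Int.mod (pvSumTo (pvCol cs m l) (j + 1 - m.toNat)) 1000000007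
      else 0 := rfl

lemma pv_guard_iff' (cs : List Char) (m : Int) (j : Nat) (hj : 1 ≤ j) :
    pvGuard cs m (j : Int) ↔ pvGoodP cs m j := by
  unfold pvGuard
  exact pv_guard_iff cs m j hj

lemma pv_A_loop (cs : List Char) (m : Int) (hm : 1 ≤ m) (K : Nat) :
    ∀ (c : Nat), c ≤ cs.length →
    pvShape ((PySem.List.pyRange 1 ((c : Int) + 1) 1).foldl (pvStepA cs m (K : Int)) (pvInit cs K, pvInit cs K)).1 cs.length K ∧
    pvShape ((PySem.List.pyRange 1 ((c : Int) + 1) 1).foldl (pvStepA cs m (K : Int)) (pvInit cs K, pvInit cs K)).2 cs.length K ∧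
    (∀ j l' : Nat, j ≤ cs.length → l' ≤ K →
      pvGet2 ((PySem.List.pyRange 1 ((c : Int) + 1) 1).foldl (pvStepA cs m (K : Int)) (pvInit cs K, pvInit cs K)).1 (j : Int) (l' : Int) =
        if j ≤ c then pvCol cs m l' j else 0) ∧
    (∀ j l' : Nat, j ≤ cs.length → l' ≤ K →
      pvGet2 ((PySem.List.pyRange 1 ((c : Int) + 1) 1).foldl (pvStepA cs m (K : Int)) (pvInit cs K, pvInit cs K)).2 (j : Int) (l' : Int) =
        if j ≤ c then pvPre cs m l' j else 0) := by
  intro c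
  induction c with
  | zero =>
    intro hc
    rw [show (((0:Nat):Int) + 1) = 1 by norm_num, PySem.List.pyRange_one_eq_nil (le_refl 1)]
    simp only [List.foldl_nil]
    obtain ⟨hsh, hget⟩ := pv_base cs K
    refine ⟨hsh, hsh, ?_, ?_⟩
    · intro j l' hj hl
      rw [hget j l']
      by_cases hj0 : j = 0
      · subst hj0
        rw [if_pos (le_refl 0), pvCol_at_zero]
        by_cases h0 : l' = 0 <;> simp [h0]
      · rw [if_neg (by tauto), if_neg (by omega)]
    · intro j l' hj hl
      rw [hget j l']
      by_cases hj0 : j = 0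
      · subst hj0
        rw [if_pos (le_refl 0), pvPre_at_zero]
        by_cases h0 : l' = 0 <;> simp [h0]
      · rw [if_neg (by tauto), if_neg (by omega)]
  | succ c ih =>
    intro hc
    obtain ⟨hsh1, hsh2, hdp, hps⟩ := ih (by omega)
    have hsplit : (PySem.List.pyRange 1 (((c + 1 : Nat) : Int) + 1) 1)
        = (PySem.List.pyRange 1 ((c : Int) + 1) 1) ++ [(c : Int) + 1] := by
      rw [show ((((c + 1 : Nat)) : Int) + 1) = ((c : Int) + 1) + 1 by push_cast; ring]
      exact PySem.List.pyRange_one_succ_right (by omega)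
    rw [hsplit, List.foldl_append]
    set R := (PySem.List.pyRange 1 ((c : Int) + 1) 1).foldl (pvStepA cs m (K : Int)) (pvInit cs K, pvInit cs K) with hR
    simp only [List.foldl_cons, List.foldl_nil]
    have hi1 : ((c + 1 : Nat) : Int) = (c : Int) + 1 := by push_cast; ring
    have hgiff : pvGuard cs m ((c : Int) + 1) ↔ pvGoodP cs m (c + 1) := by
      rw [← hi1]; exact pv_guard_iff' cs m (c + 1) (by omega)
    set D := (pvStepA cs m (K : Int) R ((c : Int) + 1)).1 with hD
    have hDprops : pvShape D cs.length K ∧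
        (∀ j l' : Nat, j ≤ cs.length → l' ≤ K →
          pvGet2 D (j : Int) (l' : Int) = if j ≤ c + 1 then pvCol cs m l' j else 0) := by
      rw [hD, pvStepA_fst]
      by_cases hg : pvGoodP cs m (c + 1)
      · rw [if_pos (hgiff.mpr hg)]
        have hw := pv_writeRow cs.length K (c + 1)
          (fun l => pvGet2 R.2 (((c : Int) + 1) - m) (l - 1)) K 1 R.1 hsh1 (by omega) (by omega)
        rw [show (((1:Nat) : Int)) = 1 from by norm_num,
            show ((1 : Int) + ((K : Nat) : Int)) = (K : Int) + 1 from by ring, hi1] at hw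
        obtain ⟨hwsh, hwget⟩ := hw
        refine ⟨hwsh, fun j l' hj hl => ?_⟩
        rw [hwget j l']
        by_cases hji : j = c + 1
        · subst hji
          by_cases hl0 : l' = 0
          · subst hl0
            rw [if_neg (by omega), hdp _ _ hj hl, if_neg (by omega), if_pos (le_refl _),
                pvCol_zero', if_neg (by omega)]
          · rw [if_pos ⟨rfl, by omega, by omega⟩]
            obtain ⟨l'', rfl⟩ : ∃ l'', l' = l'' + 1 := ⟨l' - 1, by omega⟩
            have hmle : m ≤ (c : Int) + 1 := by
              have := hg.2.1; omega
            have e1 : ((c : Int) + 1) - m = ((c + 1 - m.toNat : Nat) : Int) := by omega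
            have e2 : (((l'' + 1 : Nat)) : Int) - 1 = ((l'' : Nat) : Int) := by push_cast; ring
            simp only []
            rw [e1, e2, hps _ _ (by omega) (by omega), if_pos (by omega), if_pos (le_refl _),
                pvCol_succ, if_pos hg]
            unfold pvPre
            congr 2
            omega
        · rw [if_neg (by tauto), hdp _ _ hj hl]
          by_cases hjc : j ≤ c
          · rw [if_pos hjc, if_pos (by omega)]
          · rw [if_neg hjc, if_neg (by omega)]
      · rw [if_neg (fun hcnd => hg (hgiff.mp hcnd))]
        refine ⟨hsh1, fun j l' hj hl => ?_⟩
        rw [hdp _ _ hj hl]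
        by_cases hjc : j ≤ c
        · rw [if_pos hjc, if_pos (by omega)]
        · rw [if_neg hjc]
          by_cases hji : j = c + 1
          · subst hji
            rw [if_pos (le_refl _)]
            rcases l' with _ | l''
            · rw [pvCol_zero', if_neg (by omega)]
            · rw [pvCol_succ, if_neg hg]
          · rw [if_neg (by omega)]
    obtain ⟨hDsh, hDget⟩ := hDprops
    have hw2 := pv_writePsRow cs.length K (c + 1) (by omega)
      (fun l => pvGet2 D ((c : Int) + 1) l) (K + 1) 0 R.2 hsh2 (by omega) (by omega)
    rw [show (((0:Nat)) : Int) = 0 from by norm_num,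
        show ((0 : Int) + ((K + 1 : Nat) : Int)) = (K : Int) + 1 from by push_cast; ring, hi1] at hw2
    simp only [] at hw2
    obtain ⟨hw2sh, hw2get⟩ := hw2
    have hsnd : (pvStepA cs m (K : Int) R ((c : Int) + 1)).2 =
        (PySem.List.pyRange 0 ((K : Int) + 1) 1).foldl
          (fun preSum l =>
            pvSet2 preSum ((c : Int) + 1) l
              (PySem.Int.mod (pvGet2 preSum (((c : Int) + 1) - 1) l + pvGet2 D ((c : Int) + 1) l) 1000000007)) R.2 := by
      rw [pvStepA_snd, ← hD]
    refine ⟨hDsh, ?_, ?_, ?_⟩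
    · rw [hsnd]; exact hw2sh
    · intro j l' hj hl
      rw [hDget _ _ hj hl]
    · intro j l' hj hl
      rw [hsnd, hw2get j l']
      by_cases hji : j = c + 1
      · subst hji
        rw [if_pos ⟨rfl, by omega, by omega⟩, if_pos (le_refl _)]
        have e3 : (((c : Int) + 1) - 1) = ((c : Nat) : Int) := by ring
        rw [e3, hps _ _ (by omega) hl, if_pos (le_refl _), ← hi1, hDget _ _ (by omega) hl,
            if_pos (le_refl _)]
        show PySem.Int.mod (pvPre cs m l' c + pvCol cs m l' (c + 1)) 1000000007 = pvPre cs m l' (c + 1)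
        unfold pvPre
        rw [pvSumTo_succ (pvCol cs m l') (c + 1), pv_mod_add_mod]
      · rw [if_neg (by tauto), hps _ _ hj hl]
        by_cases hjc : j ≤ c
        · rw [if_pos hjc, if_pos (by omega)]
        · rw [if_neg hjc, if_neg (by omega)]

def pvGoodList (cs : List Char) (m : Int) : List Bool :=
  [false] ++ (PySem.List.pyRange 1 ((cs.length : Int) + 1) 1).map (fun i => decide (pvGuard cs m i))

def pvStepB (cs : List Char) (m : Int) : List Int → Int → List Int :=
  fun col _ =>
    (PySem.List.pyRange 0 ((cs.length : Int) + 1) 1).map (fun i =>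
      if PySem.List.pyGetD (pvGoodList cs m) i false then
        PySem.Int.mod (PySem.List.slice col none (some (i - m + 1))).sum 1000000007
      else 0)

lemma pv_goodList_getD (cs : List Char) (m : Int) (j : Nat) (hj : j ≤ cs.length) :
    PySem.List.pyGetD (pvGoodList cs m) (j : Int) false = decide (pvGoodP cs m j) := by
  rw [PySem.List.pyGetD_natCast]
  unfold pvGoodList
  rcases Nat.eq_zero_or_pos j with rfl | hj1
  · simp [pvGoodP]
  · obtain ⟨j', rfl⟩ : ∃ j', j = j' + 1 := ⟨j - 1, by omega⟩
    have hlt : j' < ((PySem.List.pyRange 1 ((cs.length : Int) + 1) 1).map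
        (fun i => decide (pvGuard cs m i))).length := by
      rw [List.length_map, PySem.List.length_pyRange_one]; omega
    rw [List.cons_append, List.nil_append, List.getD_cons_succ, List.getD_eq_getElem?_getD,
        List.getElem?_eq_getElem hlt, Option.getD_some, List.getElem_map,
        PySem.List.getElem_pyRange_one]
    have e : (1 : Int) + (j' : Int) = ((j' + 1 : Nat) : Int) := by push_cast; ring
    rw [e]
    exact decide_eq_decide.mpr (pv_guard_iff' cs m (j' + 1) (by omega))

lemma pv_colInit (cs : List Char) (m : Int) :
    (List.range (cs.length + 1)).map (pvCol cs m 0) = 1 :: List.replicate cs.length 0 := by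
  rw [List.range_succ_eq_map, List.map_cons, List.map_map]
  refine congrArg₂ _ rfl ?_
  rw [List.map_congr_left (g := fun _ => (0 : Int))
      (by intro x hx; simp [Function.comp, pvCol_zero'])]
  rw [List.map_const', List.length_range]

lemma pv_B_round (cs : List Char) (m : Int) (hm : 1 ≤ m) (l : Nat) (x : Int) :
    pvStepB cs m ((List.range (cs.length + 1)).map (pvCol cs m l)) x =
      (List.range (cs.length + 1)).map (pvCol cs m (l + 1)) := by
  unfold pvStepB
  rw [show ((cs.length : Int) + 1) = ((cs.length + 1 : Nat) : Int) from by push_cast; ring,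
      PySem.List.pyRange_zero_nat, List.map_map]
  apply List.map_congr_left
  intro j hj
  have hjN : j ≤ cs.length := by
    have := List.mem_range.mp hj; omega
  simp only [Function.comp]
  rw [pv_goodList_getD cs m j hjN]
  by_cases hg : pvGoodP cs m j
  · rw [if_pos (by simpa using hg), pvCol_succ, if_pos hg]
    have h0 : 0 ≤ (j : Int) - m + 1 := by
      have := hg.2.1; omega
    rw [PySem.List.slice_to _ h0]
    have e : ((j : Int) - m + 1).toNat = j + 1 - m.toNat := by omega
    rw [e, ← List.map_take, List.take_range]
    have e2 : min (j + 1 - m.toNat) (cs.length + 1) = j + 1 - m.toNat := by omega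
    rw [e2]
    rfl
  · rw [if_neg (by simpa using hg), pvCol_succ, if_neg hg]

lemma pv_B_loop (cs : List Char) (m : Int) (hm : 1 ≤ m) :
    ∀ L : Nat,
      (PySem.List.pyRange 0 (L : Int) 1).foldl (pvStepB cs m)
          ((List.range (cs.length + 1)).map (pvCol cs m 0)) =
        (List.range (cs.length + 1)).map (pvCol cs m L) := by
  intro L
  induction L with
  | zero => rw [show ((0:Nat):Int) = 0 from rfl, PySem.List.pyRange_one_eq_nil (le_refl 0), List.foldl_nil]
  | succ L ih =>
    rw [show ((L + 1 : Nat) : Int) = (L : Int) + 1 from by push_cast; ring,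
        PySem.List.pyRange_one_succ_right (by omega), List.foldl_append, ih,
        List.foldl_cons, List.foldl_nil, pv_B_round cs m hm]

lemma pv_B_final (cs : List Char) (m : Int) (K : Nat) :
    PySem.List.pyGetD ((List.range (cs.length + 1)).map (pvCol cs m K)) (cs.length : Int) 0 =
      pvCol cs m K cs.length := by
  rw [PySem.List.pyGetD_natCast, List.getD_eq_getElem?_getD, List.getElem?_map,
      List.getElem?_range (by omega)]
  rfl

-- ===== VERDICT (by name: the statement is the Claim_ definition above) =====

theorem beautifulPartitions6_spec : Claim_equal_beautifulPartitions6 := by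
  intro s k m hDom hPre
  obtain ⟨hs, hrest⟩ := hPre
  unfold Spec_beautifulPartitions6
  have hne : s.toList ≠ [] := by simp [String.toList_eq_nil_iff, hs]
  have h0 : PySem.List.pyGetD s.toList 0 ' ' = s.toList.getD 0 ' ' :=
    PySem.List.pyGetD_zero s.toList ' '
  have h1 : PySem.List.pyGetD s.toList (-1) ' ' = s.toList.getD (s.toList.length - 1) ' ' := by
    rw [PySem.List.pyGetD_neg_one s.toList ' ' hne, List.getLast_eq_getElem, List.getD_eq_getElem?_getD,
        List.getElem?_eq_getElem (by have := List.length_pos_iff.mpr hne; omega), Option.getD_some]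
  by_cases hcond : ¬ PySem.List.pyGetD s.toList 0 ' ' ∈ PySem.Set.ofList ['2', '3', '5', '7'] ∨
      PySem.List.pyGetD s.toList (-1) ' ' ∈ PySem.Set.ofList ['2', '3', '5', '7']
  · -- the first/last-digit check fails: both programs return 0 at once
    simp only [beautifulPartitions6, beautifulPartitions6_alt]
    rw [if_pos hcond, if_pos hcond]
  · have hkm : 0 ≤ k ∧ 1 ≤ m := by
      rw [not_or, not_not] at hcond
      rcases hrest with h | h | h
      · exact h
      · exact absurd ((PySem.Set.mem_ofList _ _).mp (h0 ▸ hcond.1)) h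
      · exact absurd (h1 ▸ ((PySem.Set.mem_ofList _ _).mpr h)) hcond.2
    obtain ⟨hk, hm⟩ := hkm
    obtain ⟨K, rfl⟩ : ∃ K : Nat, k = (K : Int) := ⟨k.toNat, by omega⟩
    have hMOD : (10 : Int) ^ 9 + 7 = 1000000007 := by norm_num
    have hA : beautifulPartitions6 s (K : Int) m =
        if ¬ PySem.List.pyGetD s.toList 0 ' ' ∈ PySem.Set.ofList ['2', '3', '5', '7'] ∨
          PySem.List.pyGetD s.toList (-1) ' ' ∈ PySem.Set.ofList ['2', '3', '5', '7'] then 0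
      else pvGet2 ((PySem.List.pyRange 1 ((s.toList.length : Int) + 1) 1).foldl
          (pvStepA s.toList m (K : Int)) (pvInit s.toList K, pvInit s.toList K)).1
          (s.toList.length : Int) (K : Int) := by
      simp only [beautifulPartitions6, hMOD, PySem.List.len_eq, pvInit]
      rfl
    have hB : beautifulPartitions6_alt s (K : Int) m =
        if ¬ PySem.List.pyGetD s.toList 0 ' ' ∈ PySem.Set.ofList ['2', '3', '5', '7'] ∨
            PySem.List.pyGetD s.toList (-1) ' ' ∈ PySem.Set.ofList ['2', '3', '5', '7'] then 0
        else PySem.List.pyGetD ((PySem.List.pyRange 0 ((K : Nat) : Int) 1).foldl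
            (pvStepB s.toList m) ((1 : Int) :: List.replicate s.toList.length 0))
            (s.toList.length : Int) 0 := by
      simp only [beautifulPartitions6_alt, hMOD, PySem.List.len_eq,
        Int.toNat_natCast, List.cons_append, List.nil_append]
      rfl
    rw [hA, hB, if_neg hcond, if_neg hcond]
    obtain ⟨_, _, hdp, _⟩ := pv_A_loop s.toList m hm K s.toList.length (le_refl _)
    rw [hdp s.toList.length K (le_refl _) (le_refl _), if_pos (le_refl _),
        show ((1 : Int) :: List.replicate s.toList.length 0) =
          (List.range (s.toList.length + 1)).map (pvCol s.toList m 0) from (pv_colInit s.toList m).symm,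
        pv_B_loop s.toList m hm K, pv_B_final]
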